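-- pv_equiv track=rewrite | github.com/erdnaxeli/adventofcode | 2024/day07.py | compute_equation2
-- ===== SOURCE A (Python) =====
-- def compute_equation2(result, acc, values, debug):
--     if acc > result:
--         return False
--
--     if not values:
--         return result == acc
--
--     return compute_equation2(
--         result, int(f"{acc}{values[0]}"), values[1:], f"{debug} || {values[0]}"
--     ) or compute_equation2(
--         result, acc + values[0], values[1:], f"{debug} + {values[0]}"
--     ) or compute_equation2(result, acc * values[0], values[1:], f"{debug} * {values[0]}")
-- ===== SOURCE B (Python) =====
-- def compute_equation2(result, acc, values, debug):
--     # Level-order search with a deduplicated frontier of reachable accumulator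
--     # values (all kept <= result), instead of A's 3-way recursive DFS; the
--     # debug strings A threads along are never observable and are not built.
--     frontier = {acc} if acc <= result else set()
--     for v in values:
--         nxt = set()
--         for a in frontier:
--             c = int(f"{a}{v}")
--             if c <= result:
--                 nxt.add(c)
--             if a + v <= result:
--                 nxt.add(a + v)
--             if a * v <= result:
--                 nxt.add(a * v)
--         frontier = nxt
--     return result in frontier
-- ===== Notes on version B (the rewrite author's own statement) =====
-- stated objective: alternative
-- what changed: A's three-way recursive DFS (which also builds a debug string per node) is replaced by a level-order search that keeps one deduplicated set of reachable accumulator values (all kept <= result) per position, checking membership of result at the end.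
-- outside the precondition, e.g. on compute_equation2(5, 1, [100, -3], ''): A returns False, B returns False
import Mathlib
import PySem

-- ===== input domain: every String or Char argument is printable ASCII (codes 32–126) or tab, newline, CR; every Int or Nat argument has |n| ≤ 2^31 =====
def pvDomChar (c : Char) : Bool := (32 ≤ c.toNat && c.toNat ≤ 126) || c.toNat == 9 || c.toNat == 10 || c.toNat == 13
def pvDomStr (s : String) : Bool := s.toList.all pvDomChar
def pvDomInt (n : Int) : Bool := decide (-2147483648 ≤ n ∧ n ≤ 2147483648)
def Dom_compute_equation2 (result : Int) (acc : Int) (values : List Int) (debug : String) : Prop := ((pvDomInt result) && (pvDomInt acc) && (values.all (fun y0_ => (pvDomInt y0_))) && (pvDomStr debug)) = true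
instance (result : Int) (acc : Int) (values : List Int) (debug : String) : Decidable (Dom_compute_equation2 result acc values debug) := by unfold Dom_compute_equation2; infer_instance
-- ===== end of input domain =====

-- B replaces A's three-way recursive DFS (which also builds unused debug strings)
-- by a level-order search over a deduplicated set frontier of reachable
-- accumulator values; the return values agree on all lists of nonnegative values.

-- ===== PORT A =====
def compute_equation2 (result : Int) (acc : Int) (values : List Int) (debug : String) : Bool :=
  if acc > result then false
  else
    match values with
    | [] => result == acc
    | v :: rest =>
      (match PySem.Int.ofChars? (PySem.Int.toChars acc ++ PySem.Int.toChars v) with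
       | some n => compute_equation2 result n rest (debug ++ " || " ++ PySem.Int.toStr v)
       | none => false) ||   -- none = Python raises ValueError (v < 0); outside Pre_
      compute_equation2 result (acc + v) rest (debug ++ " + " ++ PySem.Int.toStr v) ||
      compute_equation2 result (acc * v) rest (debug ++ " * " ++ PySem.Int.toStr v)

-- ===== PORT B =====
def pvStep (result : Int) (frontier : PySem.Set Int) (v : Int) : PySem.Set Int :=
  frontier.foldl (fun nxt a =>
    let nxt1 := match PySem.Int.ofChars? (PySem.Int.toChars a ++ PySem.Int.toChars v) with
      | some c => if c ≤ result then PySem.Set.add nxt c else nxt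
      | none => nxt    -- none = Python raises ValueError (v < 0); outside Pre_
    let nxt2 := if a + v ≤ result then PySem.Set.add nxt1 (a + v) else nxt1
    if a * v ≤ result then PySem.Set.add nxt2 (a * v) else nxt2)
    PySem.Set.empty

def compute_equation2_alt (result : Int) (acc : Int) (values : List Int) (debug : String) : Bool :=
  let frontier : PySem.Set Int :=
    if acc ≤ result then PySem.Set.add PySem.Set.empty acc else PySem.Set.empty
  PySem.Set.contains (values.foldl (pvStep result) frontier) result

-- ===== PRECONDITION & SPEC =====
-- Pre_ excludes lists containing a negative value unless acc > result (where A
-- returns False before touching the list): on a reached negative value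
-- int(f"{acc}{v}") raises ValueError, so A (and B) raise on almost all such
-- inputs; on the few where A's acc>result prune cuts every path before reaching
-- the negative value, A returns False and B returns False as well (see cites).
def Pre_compute_equation2 (result : Int) (acc : Int) (values : List Int) (debug : String) : Prop :=
  (∀ v ∈ values, 0 ≤ v) ∨ result < acc
instance (result : Int) (acc : Int) (values : List Int) (debug : String) : Decidable (Pre_compute_equation2 result acc values debug) := by unfold Pre_compute_equation2; infer_instance

def pvWitness_compute_equation2 : Int × Int × List Int × String := (29, 2, [9], "go")

def Spec_compute_equation2 (result : Int) (acc : Int) (values : List Int) (debug : String) (out : Bool) : Prop := out = compute_equation2_alt result acc values debug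
instance (result : Int) (acc : Int) (values : List Int) (debug : String) (out : Bool) : Decidable (Spec_compute_equation2 result acc values debug out) := by unfold Spec_compute_equation2; infer_instance

-- ===== CLAIM (what is proved, stated in full; the proofs are below) =====
def Claim_equal_compute_equation2 : Prop := ∀ (result : Int) (acc : Int) (values : List Int) (debug : String), Dom_compute_equation2 result acc values debug → Pre_compute_equation2 result acc values debug → Spec_compute_equation2 result acc values debug (compute_equation2 result acc values debug)

-- ===== LEMMAS AND PROOFS =====

-- the debug string never influences A's return value
theorem pvA_debug_irrel (result : Int) (values : List Int) : ∀ (acc : Int) (d1 d2 : String),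
    compute_equation2 result acc values d1 = compute_equation2 result acc values d2 := by
  induction values with
  | nil => intro acc d1 d2; rfl
  | cons v rest ih =>
    intro acc d1 d2
    unfold compute_equation2
    by_cases h : acc > result
    · simp [h]
    · simp only [h, if_false]
      cases hc : PySem.Int.ofChars? (PySem.Int.toChars acc ++ PySem.Int.toChars v) with
      | none =>
        rw [ih (acc + v) (d1 ++ " + " ++ PySem.Int.toStr v) (d2 ++ " + " ++ PySem.Int.toStr v),
            ih (acc * v) (d1 ++ " * " ++ PySem.Int.toStr v) (d2 ++ " * " ++ PySem.Int.toStr v)]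
      | some n =>
        simp only []
        rw [ih n (d1 ++ " || " ++ PySem.Int.toStr v) (d2 ++ " || " ++ PySem.Int.toStr v),
            ih (acc + v) (d1 ++ " + " ++ PySem.Int.toStr v) (d2 ++ " + " ++ PySem.Int.toStr v),
            ih (acc * v) (d1 ++ " * " ++ PySem.Int.toStr v) (d2 ++ " * " ++ PySem.Int.toStr v)]

-- A prunes: a too-large accumulator yields false
theorem pvA_gt (result acc : Int) (values : List Int) (d : String) (h : result < acc) :
    compute_equation2 result acc values d = false := by
  unfold compute_equation2
  simp [h]

-- one legal child step of the search
def pvChild (result v a b : Int) : Prop :=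
  b ≤ result ∧ (PySem.Int.ofChars? (PySem.Int.toChars a ++ PySem.Int.toChars v) = some b ∨ b = a + v ∨ b = a * v)

theorem pv_mem_ite_add (b x : Int) (P : Prop) [Decidable P] (s : PySem.Set Int) :
    b ∈ (if P then PySem.Set.add s x else s) ↔ b ∈ s ∨ (P ∧ b = x) := by
  split_ifs with h <;> simp [PySem.Set.mem_add, h]

theorem pv_mem_body (result v a b : Int) (s : PySem.Set Int) :
    b ∈ ((fun nxt a =>
      let nxt1 := match PySem.Int.ofChars? (PySem.Int.toChars a ++ PySem.Int.toChars v) with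
        | some c => if c ≤ result then PySem.Set.add nxt c else nxt
        | none => nxt
      let nxt2 := if a + v ≤ result then PySem.Set.add nxt1 (a + v) else nxt1
      if a * v ≤ result then PySem.Set.add nxt2 (a * v) else nxt2) s a : PySem.Set Int)
      ↔ b ∈ s ∨ pvChild result v a b := by
  simp only []
  cases hc : PySem.Int.ofChars? (PySem.Int.toChars a ++ PySem.Int.toChars v) with
  | none =>
    simp only [pv_mem_ite_add, pvChild, hc]
    constructor
    · rintro ((h | ⟨h1, h2⟩) | ⟨h1, h2⟩)
      · exact Or.inl h
      · exact Or.inr ⟨by omega, Or.inr (Or.inl h2)⟩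
      · exact Or.inr ⟨by omega, Or.inr (Or.inr h2)⟩
    · rintro (h | ⟨h1, (h2 | h2 | h2)⟩)
      · exact Or.inl (Or.inl h)
      · exact absurd h2 (by simp)
      · exact Or.inl (Or.inr ⟨by omega, h2⟩)
      · exact Or.inr ⟨by omega, h2⟩
  | some c =>
    simp only [pv_mem_ite_add, pvChild, hc]
    constructor
    · rintro (((h | ⟨h1, h2⟩) | ⟨h1, h2⟩) | ⟨h1, h2⟩)
      · exact Or.inl h
      · exact Or.inr ⟨by omega, Or.inl (by rw [h2])⟩
      · exact Or.inr ⟨by omega, Or.inr (Or.inl h2)⟩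
      · exact Or.inr ⟨by omega, Or.inr (Or.inr h2)⟩
    · rintro (h | ⟨h1, (h2 | h2 | h2)⟩)
      · exact Or.inl (Or.inl (Or.inl h))
      · have : c = b := by injection h2
        exact Or.inl (Or.inl (Or.inr ⟨by omega, this.symm⟩))
      · exact Or.inl (Or.inr ⟨by omega, h2⟩)
      · exact Or.inr ⟨by omega, h2⟩

theorem pv_mem_foldl (result v b : Int) :
    ∀ (l : List Int) (s : PySem.Set Int),
      b ∈ l.foldl (fun nxt a =>
        let nxt1 := match PySem.Int.ofChars? (PySem.Int.toChars a ++ PySem.Int.toChars v) with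
          | some c => if c ≤ result then PySem.Set.add nxt c else nxt
          | none => nxt
        let nxt2 := if a + v ≤ result then PySem.Set.add nxt1 (a + v) else nxt1
        if a * v ≤ result then PySem.Set.add nxt2 (a * v) else nxt2) s
      ↔ b ∈ s ∨ ∃ a ∈ l, pvChild result v a b := by
  intro l
  induction l with
  | nil => intro s; simp
  | cons a l ih =>
    intro s
    rw [List.foldl_cons, ih, pv_mem_body]
    simp only [List.mem_cons]
    constructor
    · rintro ((h | h) | ⟨x, hx, hc⟩)
      · exact Or.inl h
      · exact Or.inr ⟨a, Or.inl rfl, h⟩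
      · exact Or.inr ⟨x, Or.inr hx, hc⟩
    · rintro (h | ⟨x, (rfl | hx), hc⟩)
      · exact Or.inl (Or.inl h)
      · exact Or.inl (Or.inr hc)
      · exact Or.inr ⟨x, hx, hc⟩

theorem pv_mem_pvStep (result v b : Int) (F : PySem.Set Int) :
    b ∈ pvStep result F v ↔ ∃ a ∈ F, pvChild result v a b := by
  unfold pvStep
  rw [pv_mem_foldl]
  simp [PySem.Set.empty]

theorem pvA_cons_iff (result a v : Int) (vs : List Int) (d : String) (ha : a ≤ result) :
    compute_equation2 result a (v :: vs) d = true ↔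
      ∃ b, pvChild result v a b ∧ compute_equation2 result b vs d = true := by
  conv_lhs => rw [compute_equation2]
  have ha' : ¬(a > result) := by omega
  simp only [ha', if_false]
  cases hc : PySem.Int.ofChars? (PySem.Int.toChars a ++ PySem.Int.toChars v) with
  | none =>
    simp only [Bool.or_eq_true, Bool.false_eq_true, false_or]
    constructor
    · rintro (h | h)
      · refine ⟨a + v, ⟨?_, Or.inr (Or.inl rfl)⟩, ?_⟩
        · by_contra hgt
          rw [pvA_gt result (a + v) vs _ (by omega)] at h; exact absurd h (by simp)
        · rw [pvA_debug_irrel] at h; exact h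
      · refine ⟨a * v, ⟨?_, Or.inr (Or.inr rfl)⟩, ?_⟩
        · by_contra hgt
          rw [pvA_gt result (a * v) vs _ (by omega)] at h; exact absurd h (by simp)
        · rw [pvA_debug_irrel] at h; exact h
    · rintro ⟨b, ⟨hb, (h2 | h2 | h2)⟩, hA⟩
      · rw [hc] at h2; exact absurd h2 (by simp)
      · subst h2; exact Or.inl (by rw [pvA_debug_irrel] at hA; exact hA)
      · subst h2; exact Or.inr (by rw [pvA_debug_irrel] at hA; exact hA)
  | some n =>
    simp only [Bool.or_eq_true]
    constructor
    · rintro ((h | h) | h)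
      · refine ⟨n, ⟨?_, Or.inl hc⟩, ?_⟩
        · by_contra hgt
          rw [pvA_gt result n vs _ (by omega)] at h; exact absurd h (by simp)
        · rw [pvA_debug_irrel] at h; exact h
      · refine ⟨a + v, ⟨?_, Or.inr (Or.inl rfl)⟩, ?_⟩
        · by_contra hgt
          rw [pvA_gt result (a + v) vs _ (by omega)] at h; exact absurd h (by simp)
        · rw [pvA_debug_irrel] at h; exact h
      · refine ⟨a * v, ⟨?_, Or.inr (Or.inr rfl)⟩, ?_⟩
        · by_contra hgt
          rw [pvA_gt result (a * v) vs _ (by omega)] at h; exact absurd h (by simp)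
        · rw [pvA_debug_irrel] at h; exact h
    · rintro ⟨b, ⟨hb, (h2 | h2 | h2)⟩, hA⟩
      · rw [hc] at h2
        have : n = b := by injection h2
        subst this
        exact Or.inl (Or.inl (by rw [pvA_debug_irrel] at hA; exact hA))
      · subst h2; exact Or.inl (Or.inr (by rw [pvA_debug_irrel] at hA; exact hA))
      · subst h2; exact Or.inr (by rw [pvA_debug_irrel] at hA; exact hA)

theorem pv_main (result : Int) (vs : List Int) (d : String) :
    ∀ (F : PySem.Set Int), (∀ a ∈ F, a ≤ result) →
      (PySem.Set.contains (vs.foldl (pvStep result) F) result = true ↔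
        ∃ a ∈ F, compute_equation2 result a vs d = true) := by
  induction vs with
  | nil =>
    intro F hF
    rw [List.foldl_nil, PySem.Set.contains_iff]
    constructor
    · intro h
      refine ⟨result, h, ?_⟩
      rw [compute_equation2]
      simp
    · rintro ⟨a, ha, hA⟩
      rw [compute_equation2] at hA
      have : ¬(a > result) := by exact not_lt.mpr (hF a ha)
      simp only [this, if_false] at hA
      have : result = a := by simpa using hA
      rw [this]; exact ha
  | cons v vs ih =>
    intro F hF
    rw [List.foldl_cons]
    rw [ih (pvStep result F v) (by
      intro b hb
      rcases (pv_mem_pvStep result v b F).mp hb with ⟨a, _, hch⟩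
      exact hch.1)]
    constructor
    · rintro ⟨b, hb, hA⟩
      rcases (pv_mem_pvStep result v b F).mp hb with ⟨a, haF, hch⟩
      exact ⟨a, haF, (pvA_cons_iff result a v vs d (hF a haF)).mpr ⟨b, hch, hA⟩⟩
    · rintro ⟨a, haF, hA⟩
      rcases (pvA_cons_iff result a v vs d (hF a haF)).mp hA with ⟨b, hch, hAb⟩
      exact ⟨b, (pv_mem_pvStep result v b F).mpr ⟨a, haF, hch⟩, hAb⟩

theorem pv_foldl_empty (result : Int) (vs : List Int) :
    vs.foldl (pvStep result) PySem.Set.empty = PySem.Set.empty := by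
  induction vs with
  | nil => rfl
  | cons v vs ih => rw [List.foldl_cons]; exact ih

theorem pv_final (result : Int) (acc : Int) (values : List Int) (debug : String) :
    compute_equation2 result acc values debug = compute_equation2_alt result acc values debug := by
  unfold compute_equation2_alt
  by_cases hacc : acc ≤ result
  · simp only [hacc, if_true]
    rw [Bool.eq_iff_iff]
    rw [pv_main result values debug (PySem.Set.add PySem.Set.empty acc)
      (by intro a ha; simp [PySem.Set.empty, PySem.Set.add] at ha; omega)]
    constructor
    · intro h; exact ⟨acc, by simp [PySem.Set.add, PySem.Set.empty], h⟩
    · rintro ⟨a, ha, hA⟩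
      have : a = acc := by simpa [PySem.Set.add, PySem.Set.empty] using ha
      rw [← this]; exact hA
  · simp only [hacc, if_false]
    rw [pv_foldl_empty]
    rw [pvA_gt result acc values debug (by omega)]
    rfl

-- ===== VERDICT (by name: the statement is the Claim_ definition above) =====
theorem compute_equation2_spec : Claim_equal_compute_equation2 := by
  intro result acc values debug _ _
  exact pv_final result acc values debug
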